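-- pv_equiv track=rewrite | github.com/betovildoza/Architect_compass | architect_symbols.py | _keep_only_php_blocks
-- ===== SOURCE A (Python) =====
-- def _keep_only_php_blocks(source: str) -> str:
--     """Reemplaza todo lo que NO esté entre `<?php` y `?>` con espacios.
--
--     Preserva offsets (línea / columna) para que los regex reporten línea
--     correcta. Archivos PHP puros sin `<?php` explícito (raro) se tratan
--     como todo-PHP.
--     """
--     if "<?php" not in source and "<?=" not in source:
--         return source  # assume pure-PHP file
--     out = list(" " * len(source))
--     i = 0
--     n = len(source)
--     while i < n:
--         # Buscar apertura
--         open_idx = source.find("<?", i)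
--         if open_idx == -1:
--             break
--         # Saltar el tag de apertura
--         if source.startswith("<?php", open_idx):
--             tag_end = open_idx + 5
--         elif source.startswith("<?=", open_idx):
--             tag_end = open_idx + 3
--         else:
--             tag_end = open_idx + 2
--         # Buscar cierre
--         close_idx = source.find("?>", tag_end)
--         if close_idx == -1:
--             close_idx = n
--         # Copiar bloque PHP preservando offset
--         for j in range(tag_end, close_idx):
--             out[j] = source[j]
--         i = close_idx + 2
--     return "".join(out)
-- ===== SOURCE B (Python) =====
-- def _keep_only_php_blocks(source: str) -> str:
--     """Blank out everything outside <?php/<?= ... ?> blocks, preserving offsets."""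
--     if "<?php" not in source and "<?=" not in source:
--         return source  # assume pure-PHP file
--     parts = []
--     s = source
--     while True:
--         idx = s.find("<?")
--         if idx == -1:
--             parts.append(" " * len(s))
--             break
--         rest = s[idx + 2:]
--         if rest.startswith("php"):
--             body, pad = rest[3:], 5
--         elif rest.startswith("="):
--             body, pad = rest[1:], 3
--         else:
--             body, pad = rest, 2
--         c = body.find("?>")
--         if c == -1:
--             parts.append(" " * (idx + pad) + body)
--             break
--         parts.append(" " * (idx + pad) + body[:c] + "  ")
--         s = body[c + 2:]
--     return "".join(parts)
-- ===== Notes on version B (the rewrite author's own statement) =====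
-- stated objective: alternative
-- what changed: B drops A's preallocated space buffer with absolute-index writes and instead slices each processed region off the front of the string, emitting one ready-made piece (blanks for the skipped text and tags, the block body verbatim) per iteration and joining the pieces at the end.
import Mathlib
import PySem

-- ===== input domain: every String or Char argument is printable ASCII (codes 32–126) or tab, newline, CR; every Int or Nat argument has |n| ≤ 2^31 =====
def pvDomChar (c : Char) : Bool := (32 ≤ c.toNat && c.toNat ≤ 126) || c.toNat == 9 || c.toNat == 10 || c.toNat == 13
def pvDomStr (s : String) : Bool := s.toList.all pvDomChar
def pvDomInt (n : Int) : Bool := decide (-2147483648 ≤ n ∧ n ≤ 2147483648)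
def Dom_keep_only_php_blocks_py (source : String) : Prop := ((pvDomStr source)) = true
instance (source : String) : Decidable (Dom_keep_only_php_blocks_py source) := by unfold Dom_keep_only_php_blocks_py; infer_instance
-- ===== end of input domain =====

-- B rebuilds the output by slicing each block off the front and concatenating pieces, instead of
-- A's absolute-index while-loop writing into a preallocated space buffer (objective: alternative).

-- ===== PORT A =====

-- `for j in range(tag_end, close_idx): out[j] = source[j]` — j is always a valid index here,
-- so `List.set`/`getD` over the Nat range is exact.
def pvWriteA (cs out : List Char) (a b : Nat) : List Char :=
  (List.range' a (b - a)).foldl (fun o j => o.set j (cs.getD j ' ')) out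

-- the `while i < n` loop of A; `source.find(sub, i)` is PySem.Chars.findFrom and
-- `source.startswith(p, o)` with 0 ≤ o ≤ n is exactly `p <+: drop o` (Chars.startswith).
-- Fuel only bounds the iteration count: i strictly increases each pass, so `n + 1` never runs out.
def pvLoopA (cs : List Char) : Nat → List Char → Nat → List Char
  | 0, out, _ => out
  | fuel + 1, out, i =>
    if i < cs.length then
      let op := PySem.Chars.findFrom cs ['<', '?'] (i : Int)
      if op = -1 then out
      else
        let o := op.toNat
        let tagEnd :=
          if PySem.Chars.startswith (cs.drop o) ['<', '?', 'p', 'h', 'p'] then o + 5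
          else if PySem.Chars.startswith (cs.drop o) ['<', '?', '='] then o + 3
          else o + 2
        let cl := PySem.Chars.findFrom cs ['?', '>'] (tagEnd : Int)
        let close := if cl = -1 then cs.length else cl.toNat
        pvLoopA cs fuel (pvWriteA cs out tagEnd close) (close + 2)
    else out

def keep_only_php_blocks_py (source : String) : String :=
  let cs := source.toList
  if !(PySem.Chars.isIn ['<', '?', 'p', 'h', 'p'] cs) && !(PySem.Chars.isIn ['<', '?', '='] cs) then
    source
  else
    String.ofList (pvLoopA cs (cs.length + 1) (List.replicate cs.length ' ') 0)

-- ===== PORT B =====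

-- the `while True` loop of B: chops the processed piece off the front of `s`, appending each
-- produced piece to `parts`; "".join(parts) is the flatten at the call site.
-- Fuel only bounds the iteration count: s strictly shrinks each pass, so `len + 1` never runs out.
def pvLoopB : Nat → List (List Char) → List Char → List (List Char)
  | 0, parts, _ => parts
  | fuel + 1, parts, s =>
    let idx := PySem.Chars.find s ['<', '?']
    if idx = -1 then parts ++ [List.replicate s.length ' ']
    else
      let d := idx.toNat
      let rest := s.drop (d + 2)
      let bp :=
        if PySem.Chars.startswith rest ['p', 'h', 'p'] then (rest.drop 3, 5)
        else if PySem.Chars.startswith rest ['='] then (rest.drop 1, 3)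
        else (rest, 2)
      let body := bp.1
      let pad := bp.2
      let c := PySem.Chars.find body ['?', '>']
      if c = -1 then parts ++ [List.replicate (d + pad) ' ' ++ body]
      else
        pvLoopB fuel (parts ++ [List.replicate (d + pad) ' ' ++ body.take c.toNat ++ [' ', ' ']])
          (body.drop (c.toNat + 2))

def keep_only_php_blocks_py_alt (source : String) : String :=
  let cs := source.toList
  if !(PySem.Chars.isIn ['<', '?', 'p', 'h', 'p'] cs) && !(PySem.Chars.isIn ['<', '?', '='] cs) then
    source
  else
    String.ofList (pvLoopB (cs.length + 1) [] cs).flatten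

-- ===== PRECONDITION & SPEC =====
def Spec_keep_only_php_blocks_py (source : String) (out : String) : Prop := out = keep_only_php_blocks_py_alt source
instance (source : String) (out : String) : Decidable (Spec_keep_only_php_blocks_py source out) := by unfold Spec_keep_only_php_blocks_py; infer_instance

-- ===== CLAIM (what is proved, stated in full; the proofs are below) =====
def Claim_equal_keep_only_php_blocks_py : Prop := ∀ (source : String), Dom_keep_only_php_blocks_py source → Spec_keep_only_php_blocks_py source (keep_only_php_blocks_py source)

-- ===== LEMMAS AND PROOFS =====

theorem pv_take_set (out : List Char) (x : Char) (a : Nat) (h : a < out.length) :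
    (out.set a x).take (a+1) = out.take a ++ [x] := by
  rw [List.set_eq_take_append_cons_drop, if_pos h, List.take_append]
  simp [Nat.min_eq_left (Nat.le_of_lt h), List.take_take]

-- what the copy loop of A does: paste source[a:b] over out[a:b]
theorem pv_write (cs : List Char) : ∀ (k a : Nat) (out : List Char), a + k ≤ cs.length → out.length = cs.length →
    (List.range' a k).foldl (fun o j => o.set j (cs.getD j ' ')) out
      = out.take a ++ (cs.drop a).take k ++ out.drop (a + k) := by
  intro k
  induction k with
  | zero => intro a out _ _; simp
  | succ k ih =>
    intro a out h1 h2
    rw [List.range'_succ]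
    simp only [List.foldl_cons]
    rw [ih (a+1) _ (by omega) (by simpa using h2)]
    have ha : a < cs.length := by omega
    have ha' : a < out.length := by omega
    rw [List.getD_eq_getElem cs ' ' ha]
    rw [List.drop_eq_getElem_cons ha, List.take_succ_cons]
    rw [pv_take_set _ _ _ ha']
    rw [List.drop_set_of_lt (hnm := by omega) ..]
    simp [List.append_assoc]
    congr 1
    omega

theorem pv_loopA_stop (cs : List Char) (f : Nat) (out : List Char) (j : Nat) (h : cs.length ≤ j) :
    pvLoopA cs f out j = out := by
  cases f with
  | zero => rfl
  | succ f => simp [pvLoopA, Nat.not_lt.mpr h]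

theorem pv_take_pr (pre : List Char) (m a : Nat) (h1 : pre.length ≤ a) (h2 : a ≤ pre.length + m) :
    (pre ++ List.replicate m ' ').take a = pre ++ List.replicate (a - pre.length) ' ' := by
  rw [List.take_append, List.take_of_length_le h1, List.take_replicate,
    Nat.min_eq_left (by omega)]

theorem pv_drop_pr (pre : List Char) (m a : Nat) (h1 : pre.length ≤ a) :
    (pre ++ List.replicate m ' ').drop a = List.replicate (m - (a - pre.length)) ' ' := by
  rw [List.drop_append, List.drop_of_length_le h1, List.drop_replicate]
  simp


-- shared continuation of one found-"<?" iteration: A writes source[tag_end:close] into the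
-- buffer and jumps; B emits one piece and recurses on the rest
theorem pv_step (fuel : Nat) (cs pre : List Char) (parts : List (List Char)) (i e pad : Nat)
    (ih : ∀ (cs pre : List Char) (parts : List (List Char)) (i : Nat),
      cs.length - i < fuel → pre.length = i → i ≤ cs.length → parts.flatten = pre →
      pvLoopA cs fuel (pre ++ List.replicate (cs.length - i) ' ') i
        = (pvLoopB fuel parts (cs.drop i)).flatten)
    (hp : pre.length = i) (hfl : parts.flatten = pre)
    (hf : cs.length - i < fuel + 1) (hpad : 2 ≤ pad) (htag : i + e + pad ≤ cs.length) :
    (let cl := PySem.Chars.findFrom cs ['?', '>'] ((i + e + pad : Nat) : Int);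
     let close := if cl = -1 then cs.length else cl.toNat;
     pvLoopA cs fuel (pvWriteA cs (pre ++ List.replicate (cs.length - i) ' ') (i + e + pad) close) (close + 2))
    = (let c := PySem.Chars.find (cs.drop (i + e + pad)) ['?', '>'];
       if c = -1 then parts ++ [List.replicate (e + pad) ' ' ++ cs.drop (i + e + pad)]
       else pvLoopB fuel
         (parts ++ [List.replicate (e + pad) ' ' ++ (cs.drop (i + e + pad)).take c.toNat ++ [' ', ' ']])
         ((cs.drop (i + e + pad)).drop (c.toNat + 2))).flatten := by
  have hlen : (pre ++ List.replicate (cs.length - i) ' ').length = cs.length := by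
    simp [hp]; omega
  rw [PySem.Chars.findFrom_natCast cs ['?', '>'] (i + e + pad) htag]
  by_cases hcm : PySem.Chars.find (cs.drop (i + e + pad)) ['?', '>'] = -1
  · simp only [hcm, reduceIte]
    rw [pv_loopA_stop cs fuel _ _ (by omega)]
    unfold pvWriteA
    rw [pv_write cs (cs.length - (i + e + pad)) (i + e + pad) _ (by omega) hlen]
    rw [Nat.add_sub_cancel' (by omega : i + e + pad ≤ cs.length)]
    rw [pv_take_pr pre _ _ (by omega) (by omega), pv_drop_pr pre _ _ (by omega)]
    rw [List.take_of_length_le (by simp)]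
    simp [hp, hfl, List.append_assoc]
    omega
  · have h0c : 0 ≤ PySem.Chars.find (cs.drop (i + e + pad)) ['?', '>'] := by
      have := PySem.Chars.neg_one_le_find (cs.drop (i + e + pad)) ['?', '>']; omega
    set q := (PySem.Chars.find (cs.drop (i + e + pad)) ['?', '>']).toNat with hqdef
    have hqc : PySem.Chars.find (cs.drop (i + e + pad)) ['?', '>'] = (q : Int) :=
      (Int.toNat_of_nonneg h0c).symm
    have hq2 : i + e + pad + q + 2 ≤ cs.length := by
      have hsp := (PySem.Chars.find_spec (s := cs.drop (i + e + pad)) (sub := ['?', '>']) h0c).1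
      rw [← hqdef, List.drop_drop] at hsp
      have := hsp.length_le
      simp at this
      omega
    rw [hqc]
    have hclose : (((i + e + pad : Nat) : Int) + (q : Int)).toNat = i + e + pad + q := by omega
    simp only [Int.toNat_natCast,
      if_neg (show ¬((i + e + pad : Nat) : Int) + (q : Int) = -1 from by omega),
      if_neg (show ¬(q : Int) = -1 from by omega), hclose]
    unfold pvWriteA
    rw [pv_write cs _ _ _ (by omega : (i + e + pad) + (i + e + pad + q - (i + e + pad)) ≤ cs.length) hlen]
    rw [show i + e + pad + q - (i + e + pad) = q from by omega]
    rw [pv_take_pr pre _ _ (by omega) (by omega), pv_drop_pr pre _ _ (by omega)]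
    rw [show cs.length - i - (i + e + pad + q - pre.length) = (cs.length - (i + e + pad + q + 2)) + 2 from by omega]
    rw [show (cs.length - (i + e + pad + q + 2)) + 2 = 2 + (cs.length - (i + e + pad + q + 2)) from by omega]
    rw [List.replicate_add]
    have harg : (cs.drop (i + e + pad)).drop (q + 2) = cs.drop (i + e + pad + q + 2) := by
      rw [List.drop_drop]; congr 1
    rw [harg]
    have := ih cs
      (pre ++ (List.replicate (e + pad) ' ' ++ ((cs.drop (i + e + pad)).take q ++ [' ', ' '])))
      (parts ++ [List.replicate (e + pad) ' ' ++ (cs.drop (i + e + pad)).take q ++ [' ', ' ']])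
      (i + e + pad + q + 2)
      (by omega)
      (by simp [hp, List.length_take]; omega) 
      (by omega)
      (by simp [hfl, List.append_assoc])
    rw [hp, show i + e + pad - i = e + pad from by omega,
      show List.replicate 2 ' ' = [' ', ' '] from rfl]
    simp only [List.append_assoc] at this ⊢
    exact this

theorem pv_main : ∀ (fuel : Nat) (cs pre : List Char) (parts : List (List Char)) (i : Nat),
    cs.length - i < fuel → pre.length = i → i ≤ cs.length → parts.flatten = pre →
    pvLoopA cs fuel (pre ++ List.replicate (cs.length - i) ' ') i
      = (pvLoopB fuel parts (cs.drop i)).flatten := by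
  intro fuel
  induction fuel with
  | zero => intro cs pre parts i h _ _ _; omega
  | succ fuel ih =>
    intro cs pre parts i hf hp hi hfl
    by_cases hin : i < cs.length
    case neg =>
      have hieq : cs.drop i = [] := List.drop_eq_nil_of_le (by omega)
      rw [pvLoopA, if_neg hin, pvLoopB, hieq]
      rw [if_pos (by decide)]
      simp [hfl, Nat.le_antisymm hi (Nat.not_lt.mp hin)]
    case pos =>
      rw [pvLoopA, if_pos hin, PySem.Chars.findFrom_natCast cs ['<', '?'] i (le_of_lt hin), pvLoopB]
      by_cases hfnd : PySem.Chars.find (cs.drop i) ['<', '?'] = -1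
      · simp only [hfnd, reduceIte]
        simp [hfl]
      · have h0 : 0 ≤ PySem.Chars.find (cs.drop i) ['<', '?'] := by
          have := PySem.Chars.neg_one_le_find (cs.drop i) ['<', '?']; omega
        set e := (PySem.Chars.find (cs.drop i) ['<', '?']).toNat with hedef
        have hec : PySem.Chars.find (cs.drop i) ['<', '?'] = (e : Int) := (Int.toNat_of_nonneg h0).symm
        rw [hec]
        simp only [if_neg (show ¬(e : Int) = -1 from by omega)]
        simp only [if_neg (show ¬((i : Int) + (e : Int)) = -1 from by omega)]
        rw [show ((i : Int) + (e : Int)).toNat = i + e from by omega]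
        have hsp := (PySem.Chars.find_spec (s := cs.drop i) (sub := ['<', '?']) h0).1
        rw [← hedef, List.drop_drop] at hsp
        obtain ⟨t, ht⟩ := hsp
        have hlt : 2 + t.length = cs.length - (i + e) := by
          have := congrArg List.length ht; simp at this; omega
        have hel : i + e + 2 ≤ cs.length := by omega
        have hdt : cs.drop (i + e + 2) = t := by
          rw [← List.drop_drop, ← ht]; rfl
        have hsw1 : PySem.Chars.startswith (cs.drop (i + e)) ['<', '?', 'p', 'h', 'p']
            = PySem.Chars.startswith t ['p', 'h', 'p'] := by
          rw [← Bool.coe_iff_coe, ← ht]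
          simp only [PySem.Chars.startswith_iff]
          simp [List.cons_prefix_cons]
        have hsw2 : PySem.Chars.startswith (cs.drop (i + e)) ['<', '?', '=']
            = PySem.Chars.startswith t ['='] := by
          rw [← Bool.coe_iff_coe, ← ht]
          simp only [PySem.Chars.startswith_iff]
          simp [List.cons_prefix_cons]
        have hrest : (cs.drop i).drop (e + 2) = t := by
          rw [List.drop_drop, show i + (e + 2) = i + e + 2 from by omega, hdt]
        rw [hrest, hsw1, hsw2]
        by_cases hb1 : PySem.Chars.startswith t ['p', 'h', 'p'] = true
        · simp only [hb1, reduceIte]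
          have h3 : 3 ≤ t.length := by
            simpa using ((PySem.Chars.startswith_iff t _).mp hb1).length_le
          have hbody : t.drop 3 = cs.drop (i + e + 5) := by
            rw [← hdt, List.drop_drop, show i + e + 2 + 3 = i + e + 5 from by omega]
          rw [hbody]
          exact pv_step fuel cs pre parts i e 5 ih hp hfl hf (by omega) (by omega)
        · simp only [if_neg hb1]
          by_cases hb2 : PySem.Chars.startswith t ['='] = true
          · simp only [hb2, reduceIte]
            have h1 : 1 ≤ t.length := by
              simpa using ((PySem.Chars.startswith_iff t _).mp hb2).length_le
            have hbody : t.drop 1 = cs.drop (i + e + 3) := by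
              rw [← hdt, List.drop_drop, show i + e + 2 + 1 = i + e + 3 from by omega]
            rw [hbody]
            exact pv_step fuel cs pre parts i e 3 ih hp hfl hf (by omega) (by omega)
          · simp only [if_neg hb2]
            rw [← hdt]
            exact pv_step fuel cs pre parts i e 2 ih hp hfl hf (by omega) (by omega)
-- ===== VERDICT (by name: the statement is the Claim_ definition above) =====
theorem keep_only_php_blocks_py_spec : Claim_equal_keep_only_php_blocks_py := by
  intro source _
  unfold Spec_keep_only_php_blocks_py keep_only_php_blocks_py keep_only_php_blocks_py_alt
  dsimp only
  split
  · rfl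
  · have := pv_main (source.toList.length + 1) source.toList [] [] 0 (by omega) rfl (by omega) rfl
    simp only [Nat.sub_zero, List.nil_append, List.drop_zero] at this
    rw [this]
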